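-- pv_equiv track=rewrite | github.com/jjsohn92/latent_mutExploration | utils/file_utils.py | compute_start_end_pos_pline
-- ===== SOURCE A (Python) =====
-- from typing import List, Dict, Tuple
--
-- def compute_start_end_pos_pline(content:str) -> Dict:
--     """
--     Return (dict):
--         key = a line number,
--         value = (start_of_line, end_of_line)
--     start from 1
--     """
--     lines = content.split("\n")
--     start_end_pos_pline = {}
--     pos = 1 # starting from 1 (so, position, not index)
--     for i, line in enumerate(lines):
--         lno = i + 1
--         l_size = len(line) #+ 1
--         start_end_pos_pline[lno] = (pos, pos + l_size - 1)
--         pos += l_size + 1 # update (+1 due to \n)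
--     return start_end_pos_pline
-- ===== SOURCE B (Python) =====
-- def compute_start_end_pos_pline(content: str):
--     # Scan for newline indices; consecutive boundary pairs delimit each line.
--     bounds = [-1]
--     for i, ch in enumerate(content):
--         if ch == "\n":
--             bounds.append(i)
--     bounds.append(len(content))
--     return {k + 1: (lo + 2, hi) for k, (lo, hi) in enumerate(zip(bounds, bounds[1:]))}
-- ===== Notes on version B (the rewrite author's own statement) =====
-- stated objective: alternative
-- what changed: Instead of splitting into lines and threading a running position over line lengths, B scans the raw characters once to collect newline indices as boundary markers and derives each line's (start,end) from consecutive boundary pairs.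
import Mathlib
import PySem

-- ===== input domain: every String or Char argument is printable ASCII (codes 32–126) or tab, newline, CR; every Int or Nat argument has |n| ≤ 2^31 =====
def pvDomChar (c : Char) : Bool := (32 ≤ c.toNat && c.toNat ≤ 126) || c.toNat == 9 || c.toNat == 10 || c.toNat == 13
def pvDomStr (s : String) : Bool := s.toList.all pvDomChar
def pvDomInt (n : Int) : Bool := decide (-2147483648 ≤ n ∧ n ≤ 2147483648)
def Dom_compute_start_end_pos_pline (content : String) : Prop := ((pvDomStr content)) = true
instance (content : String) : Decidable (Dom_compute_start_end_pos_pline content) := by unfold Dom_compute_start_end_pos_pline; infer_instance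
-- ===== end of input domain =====

-- B replaces A's split-into-lines loop with a single character scan collecting newline indices;
-- each line's (start,end) is read off a consecutive pair of boundary indices (alternative algorithm, same cost).

-- ===== PORT A =====
-- the for-loop over enumerate(lines) with the running position `pos`; keys lno are fresh, so dict insertion = append
def pvA_loop : List (List Char) → Int → Int → List (Int × Int × Int)
  | [], _, _ => []
  | line :: rest, i, pos =>
    let lsize : Int := PySem.Chars.len line
    (i + 1, pos, pos + lsize - 1) :: pvA_loop rest (i + 1) (pos + lsize + 1)

def compute_start_end_pos_pline (content : String) : List (Int × Int × Int) :=
  pvA_loop (PySem.Chars.splitOn content.toList "\n".toList) 0 1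

-- ===== PORT B =====
-- 'for i, ch in enumerate(content): if ch == "\n": bounds.append(i)' then append len(content);
-- the final comprehension enumerates zip(bounds, bounds[1:]) (bounds[1:] = drop 1, exact: bounds is nonempty)
def compute_start_end_pos_pline_alt (content : String) : List (Int × Int × Int) :=
  let cs := content.toList
  let bounds : List Int :=
    ((PySem.List.enumerate cs).foldl
      (fun acc p => if p.2 = '\n' then acc ++ [p.1] else acc) [(-1 : Int)]) ++ [PySem.Chars.len cs]
  (PySem.List.enumerate (bounds.zip (bounds.drop 1))).map (fun p => (p.1 + 1, p.2.1 + 2, p.2.2))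

-- ===== PRECONDITION & SPEC =====
def Spec_compute_start_end_pos_pline (content : String) (out : List (Int × Int × Int)) : Prop := out = compute_start_end_pos_pline_alt content
instance (content : String) (out : List (Int × Int × Int)) : Decidable (Spec_compute_start_end_pos_pline content out) := by unfold Spec_compute_start_end_pos_pline; infer_instance

-- ===== CLAIM =====
def Claim_equal_compute_start_end_pos_pline : Prop := ∀ (content : String), Dom_compute_start_end_pos_pline content → Spec_compute_start_end_pos_pline content (compute_start_end_pos_pline content)

-- ===== LEMMAS AND PROOFS =====
-- prepend xs to the first block (or start one)
def pvHeadCons (xs : List Char) : List (List Char) → List (List Char)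
  | [] => [xs]
  | h :: t => (xs ++ h) :: t

-- structural single-char split on '\n'
def pvSplitNl : List Char → List (List Char)
  | [] => [[]]
  | c :: cs => if c = '\n' then [] :: pvSplitNl cs else pvHeadCons [c] (pvSplitNl cs)

lemma pvSplitNl_ne_nil (cs : List Char) : pvSplitNl cs ≠ [] := by
  cases cs with
  | nil => simp [pvSplitNl]
  | cons c cs =>
    simp only [pvSplitNl]
    split
    · simp
    · cases h : pvSplitNl cs <;> simp [pvHeadCons]

lemma pvHeadCons_headCons (xs ys : List Char) (m : List (List Char)) :
    pvHeadCons xs (pvHeadCons ys m) = pvHeadCons (xs ++ ys) m := by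
  cases m <;> simp [pvHeadCons]

lemma pvHeadCons_nil (m : List (List Char)) (h : m ≠ []) : pvHeadCons [] m = m := by
  cases m with
  | nil => exact absurd rfl h
  | cons a t => simp [pvHeadCons]

-- structural rewrite lemmas for the scan/split functions
lemma pvSplitNl_nl (cs : List Char) : pvSplitNl ('\n' :: cs) = [] :: pvSplitNl cs := by
  simp [pvSplitNl]

lemma pvSplitNl_other (c : Char) (cs : List Char) (hc : c ≠ '\n') :
    pvSplitNl (c :: cs) = pvHeadCons [c] (pvSplitNl cs) := by
  simp [pvSplitNl, hc]

lemma pv_go_nl (cs : List Char) (fuel : Nat) (h : cs.length < fuel)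
    (cur : List Char) (acc : List (List Char)) :
    PySem.Chars.splitOn.go ['\n'] fuel cs cur acc
      = acc.reverse ++ pvHeadCons cur.reverse (pvSplitNl cs) := by
  induction cs generalizing fuel cur acc with
  | nil =>
    cases fuel with
    | zero => omega
    | succ f => simp [PySem.Chars.splitOn.go, pvSplitNl, pvHeadCons]
  | cons c rest ih =>
    cases fuel with
    | zero => omega
    | succ f =>
      by_cases hc : c = '\n'
      · subst hc
        simp only [PySem.Chars.splitOn.go]
        rw [if_pos (by simp)]
        simp only [List.length_singleton, List.drop_succ_cons, List.drop_zero]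
        rw [ih f (by simpa using h) [] (cur.reverse :: acc)]
        rw [pvSplitNl_nl]
        cases hs : pvSplitNl rest with
        | nil => exact absurd hs (pvSplitNl_ne_nil rest)
        | cons a b => simp [pvHeadCons]
      · simp only [PySem.Chars.splitOn.go]
        rw [if_neg (by simp [List.isPrefixOf]; exact fun hceq => absurd hceq.symm hc)]
        rw [ih f (by simpa using h) (c :: cur) acc]
        simp only [pvSplitNl, if_neg hc, pvHeadCons_headCons, List.reverse_cons]
lemma pv_splitOn_nl (cs : List Char) :
    PySem.Chars.splitOn cs "\n".toList = pvSplitNl cs := by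
  have : "\n".toList = ['\n'] := rfl
  rw [this]
  unfold PySem.Chars.splitOn
  rw [pv_go_nl cs (cs.length + 1) (by omega) [] []]
  simp [pvHeadCons_nil _ (pvSplitNl_ne_nil cs)]

-- newline indices of cs, 0-based from s
def pvNlPos : List Char → Int → List Int
  | [], _ => []
  | c :: cs, s => if c = '\n' then s :: pvNlPos cs (s + 1) else pvNlPos cs (s + 1)

lemma pvNlPos_nl (cs : List Char) (s : Int) : pvNlPos ('\n' :: cs) s = s :: pvNlPos cs (s + 1) := by
  simp [pvNlPos]

lemma pvNlPos_other (c : Char) (cs : List Char) (s : Int) (hc : c ≠ '\n') :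
    pvNlPos (c :: cs) s = pvNlPos cs (s + 1) := by
  simp [pvNlPos, hc]

lemma pv_len_nil : PySem.Chars.len ([] : List Char) = 0 := by simp [PySem.Chars.len]

lemma pv_fold_nl (cs : List Char) (s : Int) (init : List Int) :
    (PySem.List.enumerate cs s).foldl
      (fun acc p => if p.2 = '\n' then acc ++ [p.1] else acc) init
      = init ++ pvNlPos cs s := by
  induction cs generalizing s init with
  | nil => simp [PySem.List.enumerate_nil, pvNlPos]
  | cons c rest ih =>
    rw [PySem.List.enumerate_cons]
    simp only [List.foldl_cons, pvNlPos]
    by_cases hc : c = '\n'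
    · simp [hc, ih]
    · simp [hc, ih]

-- consecutive boundary pairs → (lno, start, end) triples
def pvPairsOut (lno : Int) : List Int → List (Int × Int × Int)
  | lo :: hi :: t => (lno, lo + 2, hi) :: pvPairsOut (lno + 1) (hi :: t)
  | _ => []

lemma pv_enum_zip (bs : List Int) (s : Int) :
    (PySem.List.enumerate (bs.zip (bs.drop 1)) s).map (fun p => (p.1 + 1, p.2.1 + 2, p.2.2))
      = pvPairsOut (s + 1) bs := by
  induction bs generalizing s with
  | nil => simp [PySem.List.enumerate_nil, pvPairsOut]
  | cons lo rest ih =>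
    cases rest with
    | nil => simp [PySem.List.enumerate_nil, pvPairsOut]
    | cons hi t =>
      simp only [List.drop_one, List.tail_cons, List.zip_cons_cons]
      rw [PySem.List.enumerate_cons]
      simp only [List.map_cons, pvPairsOut]
      have := ih (s := s + 1)
      simp only [List.drop_one, List.tail_cons] at this
      rw [this]

lemma pv_len_cons (c : Char) (cs : List Char) :
    PySem.Chars.len (c :: cs) = PySem.Chars.len cs + 1 := by
  simp [PySem.Chars.len]

-- componentwise equality of triples
lemma pv_triple_ext (a b c a' b' c' : Int) (h1 : a = a') (h2 : b = b') (h3 : c = c') :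
    ((a, b, c) : Int × Int × Int) = (a', b', c') := by subst_vars; rfl

-- the heart: A's line loop equals the boundary-pair reading of the newline scan
lemma pv_main (cs : List Char) (i s : Int) :
    pvA_loop (pvSplitNl cs) i (s + 1)
      = pvPairsOut (i + 1) ((s - 1) :: (pvNlPos cs s ++ [s + PySem.Chars.len cs])) := by
  induction cs generalizing i s with
  | nil =>
    simp [pvSplitNl, pvA_loop, pvNlPos, pvPairsOut, PySem.Chars.len]
    omega
  | cons c rest ih =>
    by_cases hc : c = '\n'
    · subst hc
      rw [pvSplitNl_nl, pvNlPos_nl, pv_len_cons]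
      simp only [pvA_loop, pv_len_nil]
      have hIH := ih (i + 1) (s + 1)
      rw [show (s + 1 - 1 : Int) = s from by ring,
          show (s + 1 + PySem.Chars.len rest : Int) = s + (PySem.Chars.len rest + 1) from by ring]
        at hIH
      rw [show (s + 1 + 0 + 1 : Int) = s + 1 + 1 from by ring, hIH]
      simp only [pvPairsOut, List.cons_append]
      exact congrArg₂ List.cons (pv_triple_ext _ _ _ _ _ _ rfl (by ring) (by ring)) rfl
    · obtain ⟨h, t, hsplit⟩ : ∃ h t, pvSplitNl rest = h :: t := by
        cases hs : pvSplitNl rest with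
        | nil => exact absurd hs (pvSplitNl_ne_nil rest)
        | cons h t => exact ⟨h, t, rfl⟩
      have hIH := ih i (s + 1)
      rw [hsplit] at hIH
      obtain ⟨hd2, rest2, hnl⟩ : ∃ hd2 rest2,
          pvNlPos rest (s + 1) ++ [s + 1 + PySem.Chars.len rest] = hd2 :: rest2 := by
        cases hn : pvNlPos rest (s + 1) with
        | nil => exact ⟨s + 1 + PySem.Chars.len rest, [], by simp⟩
        | cons a b => exact ⟨a, b ++ [s + 1 + PySem.Chars.len rest], by simp⟩
      rw [hnl] at hIH
      simp only [pvA_loop, pvPairsOut] at hIH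
      injection hIH with hhead htail
      have hd2eq : hd2 = s + 1 + PySem.Chars.len h := by
        have := congrArg (fun p => p.2.2) hhead
        simp only at this
        omega
      rw [pvSplitNl_other c rest hc, hsplit, pvNlPos_other c rest s hc]
      simp only [pvHeadCons, pvA_loop, pv_len_cons, List.singleton_append]
      rw [show (s + (PySem.Chars.len rest + 1) : Int) = s + 1 + PySem.Chars.len rest from by ring,
        hnl]
      simp only [pvPairsOut]
      refine congrArg₂ List.cons
        (pv_triple_ext _ _ _ _ _ _ rfl (by ring) (by rw [hd2eq]; ring)) ?_
      rw [show (s + 1 + (PySem.Chars.len h + 1) + 1 : Int)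
            = s + 1 + 1 + PySem.Chars.len h + 1 from by ring, htail]

-- ===== VERDICT =====
theorem compute_start_end_pos_pline_spec : Claim_equal_compute_start_end_pos_pline := by
  intro content _
  unfold Spec_compute_start_end_pos_pline compute_start_end_pos_pline compute_start_end_pos_pline_alt
  rw [pv_splitOn_nl]
  simp only [pv_fold_nl, pv_enum_zip]
  have := pv_main content.toList 0 0
  simpa [List.append_assoc] using this
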